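-- pv_equiv track=rewrite | github.com/apetrovskiy/testGfG | src/main/java/problems/easy/WaveArray/wave_array.py | convertToWave
-- ===== SOURCE A (Python) =====
-- def convertToWave(A,N):
--     #Your code here
--     result = []
--     for index in range(1, N if N % 2 == 1 else N + 1, 2):
--         result.append(A[index])
--         result.append(A[index - 1])
--     if N % 2 == 1:
--         result.append(A[len(A) - 1])
--     A = result
--     return A
-- ===== SOURCE B (Python) =====
-- def convertToWave(A, N):
--     return [A[i ^ 1] if (i ^ 1) < N else A[-1] for i in range(N)]
-- ===== Notes on version B (the rewrite author's own statement) =====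
-- stated objective: simpler
-- what changed: Replaces the pair-append loop over odd indices plus the separate odd-tail append by a single comprehension over all output indices that maps index i directly to A[i ^ 1] (XOR-1 adjacent-swap trick), with A[-1] as the out-of-range fallback for the odd tail.
-- intended difference: For negative odd N, A's odd branch unconditionally appends the last element and returns [A[-1]], while B returns [], the intended empty wave for a nonpositive length. — e.g. on convertToWave([5], -1): A returns [5], B returns []
import Mathlib
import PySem

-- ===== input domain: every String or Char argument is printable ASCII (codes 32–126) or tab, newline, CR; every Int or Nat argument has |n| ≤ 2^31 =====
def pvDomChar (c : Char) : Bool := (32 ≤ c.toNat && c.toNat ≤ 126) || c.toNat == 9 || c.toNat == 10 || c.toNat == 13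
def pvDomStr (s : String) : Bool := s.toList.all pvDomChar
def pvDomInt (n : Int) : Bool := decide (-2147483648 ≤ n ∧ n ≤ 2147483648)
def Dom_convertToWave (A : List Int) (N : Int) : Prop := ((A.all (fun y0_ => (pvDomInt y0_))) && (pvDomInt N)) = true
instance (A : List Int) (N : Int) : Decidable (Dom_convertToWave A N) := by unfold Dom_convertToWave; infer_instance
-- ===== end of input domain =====

-- B replaces A's pair-append loop (plus separate odd-tail append) by one comprehension mapping
-- each output index i to A[i ^ 1], falling back to A[-1] when i ^ 1 is past N: simpler, same O(N) cost.

-- ===== PORT A =====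
def convertToWave (A : List Int) (N : Int) : List Int :=
  -- result = []; for index in range(1, N if N % 2 == 1 else N + 1, 2):
  --     result.append(A[index]); result.append(A[index - 1])
  let result : List Int :=
    (PySem.List.pyRange 1 (if PySem.Int.mod N 2 = 1 then N else N + 1) 2).foldl
      (fun result index =>
        (result ++ [PySem.List.pyGetD A index 0]) ++ [PySem.List.pyGetD A (index - 1) 0]) []
  -- if N % 2 == 1: result.append(A[len(A) - 1])
  if PySem.Int.mod N 2 = 1 then result ++ [PySem.List.pyGetD A ((A.length : Int) - 1) 0]
  else result

-- ===== PORT B =====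
def convertToWave_alt (A : List Int) (N : Int) : List Int :=
  -- [A[i ^ 1] if (i ^ 1) < N else A[-1] for i in range(N)]
  (PySem.List.pyRange 0 N 1).map (fun i =>
    if PySem.Int.bxor i 1 < N then PySem.List.pyGetD A (PySem.Int.bxor i 1) 0
    else PySem.List.pyGetD A (-1) 0)

-- ===== PRECONDITION & SPEC =====
-- Pre_ is exactly where the Python A returns without raising IndexError: for odd N (Python's
-- N % 2 == 1, which also holds for negative odd N) the loop reads up to A[N-2] and the tail
-- append reads A[-1], so A must be nonempty and N ≤ len(A) + 1; for even N and N ≥ 1 the loop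
-- reads up to A[N-1], so N ≤ len(A).
def Pre_convertToWave (A : List Int) (N : Int) : Prop :=
  (PySem.Int.mod N 2 = 1 → A ≠ [] ∧ N ≤ (A.length : Int) + 1) ∧
  (PySem.Int.mod N 2 ≠ 1 → 1 ≤ N → N ≤ (A.length : Int))
instance (A : List Int) (N : Int) : Decidable (Pre_convertToWave A N) := by
  unfold Pre_convertToWave; infer_instance

def pvWitness_convertToWave : List Int × Int := ([10, 90, 49, 2, 1, 5, 23], 7)

-- For negative odd N, A's odd branch unconditionally appends the last element and returns
-- [A[-1]], while B returns [], the intended empty wave for a nonpositive length.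
def D_convertToWave (A : List Int) (N : Int) : Prop := N < 0 ∧ PySem.Int.mod N 2 = 1
instance (A : List Int) (N : Int) : Decidable (D_convertToWave A N) := by
  unfold D_convertToWave; infer_instance

def Spec_convertToWave (A : List Int) (N : Int) (out : List Int) : Prop :=
  ¬ D_convertToWave A N → out = convertToWave_alt A N
instance (A : List Int) (N : Int) (out : List Int) : Decidable (Spec_convertToWave A N out) := by
  unfold Spec_convertToWave; infer_instance

def pvDiffWitness_convertToWave : List Int × Int := ([5], -1)
def pvDiffWitnessOut_convertToWave : (List Int) × (List Int) := ([5], [])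

-- ===== CLAIM (what is proved, stated in full; the proofs are below) =====
def Claim_unchanged_convertToWave : Prop := ∀ (A : List Int) (N : Int), Dom_convertToWave A N → Pre_convertToWave A N → Spec_convertToWave A N (convertToWave A N)
def Claim_changed_convertToWave : Prop := Dom_convertToWave (pvDiffWitness_convertToWave.1) (pvDiffWitness_convertToWave.2) ∧ Pre_convertToWave (pvDiffWitness_convertToWave.1) (pvDiffWitness_convertToWave.2) ∧ D_convertToWave (pvDiffWitness_convertToWave.1) (pvDiffWitness_convertToWave.2) ∧ convertToWave (pvDiffWitness_convertToWave.1) (pvDiffWitness_convertToWave.2) = pvDiffWitnessOut_convertToWave.1 ∧ convertToWave_alt (pvDiffWitness_convertToWave.1) (pvDiffWitness_convertToWave.2) = pvDiffWitnessOut_convertToWave.2 ∧ pvDiffWitnessOut_convertToWave.1 ≠ pvDiffWitnessOut_convertToWave.2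
def Claim_exact_convertToWave : Prop := ∀ (A : List Int) (N : Int), Dom_convertToWave A N → Pre_convertToWave A N → D_convertToWave A N → convertToWave A N ≠ convertToWave_alt A N

-- ===== LEMMAS AND PROOFS =====

-- range(1, 2k+1, 2) = [1, 3, …, 2k-1]
theorem pvRangeOdd (k : Nat) :
    PySem.List.pyRange 1 (2 * (k : Int) + 1) 2 =
      (List.range k).map (fun j : Nat => 1 + 2 * (j : Int)) := by
  rw [PySem.List.pyRange_of_pos _ _ (by norm_num)]
  rcases Nat.eq_zero_or_pos k with h | h
  · subst h; simp
  · rw [if_pos (by omega)]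
    have e : (2 * (k : Int) + 1 - 1 + 2 - 1) = 2 * (k : Int) + 1 := by ring
    rw [e]
    have hc : ((2 * (k : Int) + 1) / 2).toNat = k := by omega
    rw [hc]

theorem pvBxorEven (k : Nat) : PySem.Int.bxor (2 * (k : Int)) 1 = 2 * k + 1 := by
  have h := PySem.Int.bxor_natCast (2 * k) 1
  rw [Nat.xor_one_of_even ⟨k, by ring⟩] at h
  push_cast at h
  exact h

theorem pvBxorOdd (k : Nat) : PySem.Int.bxor (2 * (k : Int) + 1) 1 = 2 * k := by
  have h := PySem.Int.bxor_natCast (2 * k + 1) 1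
  rw [Nat.xor_one_of_odd ⟨k, rfl⟩, Nat.add_sub_cancel] at h
  push_cast at h
  exact h

-- A's pair loop equals B's comprehension restricted to the pair region
theorem pvPairs (A : List Int) (k : Nat) :
    (PySem.List.pyRange 1 (2 * (k : Int) + 1) 2).foldl
      (fun result index =>
        (result ++ [PySem.List.pyGetD A index 0]) ++ [PySem.List.pyGetD A (index - 1) 0]) [] =
    (PySem.List.pyRange 0 (2 * (k : Int)) 1).map
      (fun i => PySem.List.pyGetD A (PySem.Int.bxor i 1) 0) := by
  induction k with
  | zero =>
      rw [pvRangeOdd 0, PySem.List.pyRange_one_eq_nil (by norm_num)]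
      simp
  | succ k ih =>
      have e1 : PySem.List.pyRange 1 (2 * ((k + 1 : Nat) : Int) + 1) 2 =
          PySem.List.pyRange 1 (2 * (k : Int) + 1) 2 ++ [2 * (k : Int) + 1] := by
        rw [pvRangeOdd (k + 1), pvRangeOdd k, List.range_succ, List.map_append]
        simp
        omega
      have e2 : PySem.List.pyRange 0 (2 * ((k + 1 : Nat) : Int)) 1 =
          (PySem.List.pyRange 0 (2 * (k : Int)) 1 ++ [2 * (k : Int)]) ++ [2 * (k : Int) + 1] := by
        have h1 : (0 : Int) ≤ 2 * (k : Int) := by positivity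
        have h2 : (0 : Int) ≤ 2 * (k : Int) + 1 := by positivity
        have e3 : 2 * ((k + 1 : Nat) : Int) = (2 * (k : Int) + 1) + 1 := by push_cast; ring
        rw [e3, PySem.List.pyRange_one_succ_right h2, PySem.List.pyRange_one_succ_right h1]
      rw [e1, List.foldl_append, ih, e2, List.map_append, List.map_append]
      simp only [List.foldl_cons, List.foldl_nil, List.map_cons, List.map_nil]
      rw [pvBxorEven k, pvBxorOdd k]
      have e4 : (2 * (k : Int) + 1 - 1) = 2 * (k : Int) := by ring
      rw [e4]

-- inside the pair region the fallback branch of B never fires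
theorem pvMapCond (A : List Int) (N : Int) (k : Nat) (h : 2 * (k : Int) ≤ N) :
    (PySem.List.pyRange 0 (2 * (k : Int)) 1).map (fun i =>
      if PySem.Int.bxor i 1 < N then PySem.List.pyGetD A (PySem.Int.bxor i 1) 0
      else PySem.List.pyGetD A (-1) 0) =
    (PySem.List.pyRange 0 (2 * (k : Int)) 1).map
      (fun i => PySem.List.pyGetD A (PySem.Int.bxor i 1) 0) := by
  apply List.map_congr_left
  intro i hi
  rw [PySem.List.mem_pyRange_one] at hi
  obtain ⟨m, rfl⟩ : ∃ m : Nat, (m : Int) = i := ⟨i.toNat, by omega⟩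
  rcases Nat.even_or_odd m with ⟨t, ht⟩ | ⟨t, ht⟩
  · have hm : (m : Int) = 2 * (t : Int) := by push_cast [ht]; ring
    rw [hm, pvBxorEven, if_pos (by omega)]
  · have hm : (m : Int) = 2 * (t : Int) + 1 := by push_cast [ht]; ring
    rw [hm, pvBxorOdd, if_pos (by omega)]

-- the tail element: A[len(A)-1] is A[-1]
theorem pvTail (A : List Int) (hA : A ≠ []) :
    PySem.List.pyGetD A ((A.length : Int) - 1) 0 = PySem.List.pyGetD A (-1) 0 := by
  have hlen : 0 < A.length := by
    cases A with
    | nil => exact absurd rfl hA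
    | cons a as => simp
  have e : (A.length : Int) - 1 = ((A.length - 1 : Nat) : Int) := by omega
  rw [PySem.List.pyGetD_neg_one A 0 hA, e, PySem.List.pyGetD_natCast,
    List.getD_eq_getElem _ _ (by omega), List.getLast_eq_getElem]

theorem pvRangeStep2Nil (N : Int) (h : N ≤ 1) : PySem.List.pyRange 1 N 2 = [] := by
  rw [PySem.List.pyRange_of_pos _ _ (by norm_num), if_neg (by omega)]
  simp

-- ===== VERDICT (by name: the statement is the Claim_ definition above) =====
theorem convertToWave_spec : Claim_unchanged_convertToWave := by
  unfold Claim_unchanged_convertToWave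
  intro A N _ hPre
  unfold Spec_convertToWave
  intro hND
  have h2 : PySem.Int.mod N 2 = N % 2 := PySem.Int.mod_eq_emod_of_pos (by norm_num)
  by_cases hodd : PySem.Int.mod N 2 = 1
  · -- odd N; outside D_ means 0 ≤ N
    have hN0 : 0 ≤ N := by
      by_contra hneg
      exact hND ⟨by omega, hodd⟩
    have hA : A ≠ [] := (hPre.1 hodd).1
    obtain ⟨k, rfl⟩ : ∃ k : Nat, N = 2 * (k : Int) + 1 :=
      ⟨(N / 2).toNat, by rw [h2] at hodd; omega⟩
    unfold convertToWave convertToWave_alt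
    rw [if_pos hodd, if_pos hodd]
    have eB : PySem.List.pyRange 0 (2 * (k : Int) + 1) 1 =
        PySem.List.pyRange 0 (2 * (k : Int)) 1 ++ [2 * (k : Int)] :=
      PySem.List.pyRange_one_succ_right (by positivity)
    rw [eB, List.map_append, pvMapCond A _ k (by omega), pvPairs A k, pvTail A hA]
    simp only [List.map_cons, List.map_nil]
    rw [pvBxorEven k, if_neg (lt_irrefl _)]
  · -- even N
    have hmod0 : N % 2 = 0 := by rw [h2] at hodd; omega
    by_cases hpos : 0 < N
    · obtain ⟨k, rfl⟩ : ∃ k : Nat, N = 2 * (k : Int) := ⟨(N / 2).toNat, by omega⟩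
      unfold convertToWave convertToWave_alt
      rw [if_neg hodd, if_neg hodd]
      rw [pvMapCond A _ k (le_refl _), ← pvPairs A k]
    · unfold convertToWave convertToWave_alt
      rw [if_neg hodd, if_neg hodd, pvRangeStep2Nil (N + 1) (by omega),
        PySem.List.pyRange_one_eq_nil (by omega)]
      simp

theorem convertToWave_changed : Claim_changed_convertToWave := by
  unfold Claim_changed_convertToWave; decide

theorem convertToWave_tight : Claim_exact_convertToWave := by
  unfold Claim_exact_convertToWave
  intro A N _ hPre hD
  obtain ⟨hneg, hm⟩ := hD
  unfold convertToWave convertToWave_alt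
  rw [if_pos hm, if_pos hm, pvRangeStep2Nil N (by omega),
    PySem.List.pyRange_one_eq_nil (by omega)]
  simp
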